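-- pv_equiv track=rewrite | github.com/Alittlefan/ray-job-server | customization/envs/defense_env/envs/draw.py | path_to_coords
-- ===== SOURCE A (Python) =====
-- def path_to_coords(start, path):
--     """
--     根据起始点和路径方向列表，返回路径经过的所有坐标列表。
--     """
--     start_x, start_y = start  # 起始点坐标
--     coords = [(start_x, start_y)]  # 初始化坐标列表，以起始点作为第一个坐标
--     current_x, current_y = start_x, start_y  # 当前坐标初始化为起始点
--
--     # 遍历路径中的方向，将方向转换为坐标变化
--     for direction in path:
--         if direction == 1:  # 上
--             current_y -= 1
--         elif direction == 3:  # 右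
--             current_x += 1
--         elif direction == 5:  # 下
--             current_y += 1
--         elif direction == 7:  # 左
--             current_x -= 1
--         coords.append((current_x, current_y))  # 将新的坐标添加到列表中
--     return coords
-- ===== SOURCE B (Python) =====
-- from itertools import accumulate
--
-- _DX = {3: 1, 7: -1}
-- _DY = {5: 1, 1: -1}
--
--
-- def path_to_coords(start, path):
--     """Staged decomposition: solve x and y as two independent 1-D prefix-sum
--     problems, then zip the two coordinate sequences into the point list."""
--     start_x, start_y = start
--     xs = accumulate((_DX.get(d, 0) for d in path), initial=start_x)
--     ys = accumulate((_DY.get(d, 0) for d in path), initial=start_y)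
--     return list(zip(xs, ys))
-- ===== Notes on version B (the rewrite author's own statement) =====
-- stated objective: alternative
-- what changed: Instead of one pass with a mutable (x,y) accumulator updated by an if/elif chain, B splits the task into two independent 1-D axis problems: separate x-delta and y-delta tables, two per-axis prefix-sum passes, and a final zip of the x-sequence with the y-sequence.
import Mathlib
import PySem

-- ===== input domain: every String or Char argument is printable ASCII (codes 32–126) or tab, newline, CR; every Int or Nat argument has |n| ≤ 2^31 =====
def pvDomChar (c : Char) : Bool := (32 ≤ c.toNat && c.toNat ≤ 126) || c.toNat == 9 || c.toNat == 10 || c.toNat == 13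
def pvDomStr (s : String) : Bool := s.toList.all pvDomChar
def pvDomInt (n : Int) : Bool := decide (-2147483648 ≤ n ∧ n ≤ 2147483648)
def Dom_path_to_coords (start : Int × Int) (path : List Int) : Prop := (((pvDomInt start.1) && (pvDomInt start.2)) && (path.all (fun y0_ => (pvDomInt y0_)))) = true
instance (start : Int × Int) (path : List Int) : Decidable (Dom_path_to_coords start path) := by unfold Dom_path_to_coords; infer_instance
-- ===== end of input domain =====

-- B: solves x and y as two independent 1-D prefix-sum passes zipped together, instead of A's single pass with a mutable (x,y) accumulator; alternative decomposition, same cost.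


-- ===== PORT A =====
def pvStepA (st : (Int × Int) × List (Int × Int)) (direction : Int) : (Int × Int) × List (Int × Int) :=
  let c := st.1
  let c' :=
    if direction = 1 then (c.1, c.2 - 1)
    else if direction = 3 then (c.1 + 1, c.2)
    else if direction = 5 then (c.1, c.2 + 1)
    else if direction = 7 then (c.1 - 1, c.2)
    else c
  (c', st.2 ++ [c'])

def path_to_coords (start : Int × Int) (path : List Int) : List (Int × Int) :=
  (path.foldl pvStepA (start, [start])).2

-- ===== PORT B =====
-- per-axis delta tables (dict .get with default 0), as in Source B
def pvDX (d : Int) : Int := if d = 3 then 1 else if d = 7 then -1 else 0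
def pvDY (d : Int) : Int := if d = 5 then 1 else if d = 1 then -1 else 0

-- itertools.accumulate(deltas, initial=s) = List.scanl (· + ·) s deltas; zip(xs, ys) = List.zip
def path_to_coords_alt (start : Int × Int) (path : List Int) : List (Int × Int) :=
  (List.scanl (· + ·) start.1 (path.map pvDX)).zip (List.scanl (· + ·) start.2 (path.map pvDY))

-- ===== PRECONDITION & SPEC =====
def Spec_path_to_coords (start : Int × Int) (path : List Int) (out : List (Int × Int)) : Prop := out = path_to_coords_alt start path
instance (start : Int × Int) (path : List Int) (out : List (Int × Int)) : Decidable (Spec_path_to_coords start path out) := by unfold Spec_path_to_coords; infer_instance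

-- ===== CLAIM (what is proved, stated in full; the proofs are below) =====
def Claim_equal_path_to_coords : Prop := ∀ (start : Int × Int) (path : List Int), Dom_path_to_coords start path → Spec_path_to_coords start path (path_to_coords start path)

-- ===== LEMMAS AND PROOFS =====
lemma foldlA_eq_zip_scanl_tail (path : List Int) (c : Int × Int) (acc : List (Int × Int)) :
    (path.foldl pvStepA (c, acc)).2
      = acc ++ ((List.scanl (· + ·) c.1 (path.map pvDX)).zip
                 (List.scanl (· + ·) c.2 (path.map pvDY))).tail := by
  induction path generalizing c acc with
  | nil => simp
  | cons d ds ih =>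
    have hstep : pvStepA (c, acc) d
        = ((c.1 + pvDX d, c.2 + pvDY d), acc ++ [(c.1 + pvDX d, c.2 + pvDY d)]) := by
      simp only [pvStepA, pvDX, pvDY]
      split_ifs <;> simp <;> omega
    simp only [List.foldl_cons, hstep, List.map_cons, List.scanl_cons, List.zip_cons_cons,
      List.tail_cons]
    rw [ih]
    rcases ds with _ | ⟨e, es⟩ <;> simp

-- ===== VERDICT (by name: the statement is the Claim_ definition above) =====
theorem path_to_coords_spec : Claim_equal_path_to_coords := by
  intro start path _
  show path_to_coords start path = path_to_coords_alt start path
  unfold path_to_coords path_to_coords_alt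
  rw [foldlA_eq_zip_scanl_tail]
  rcases path with _ | ⟨e, es⟩ <;> simp
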